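-- pv_equiv track=rewrite | github.com/youaresherlock/PythonPractice | Foundation/algorithms/相似的数量.py | get_similar_str
-- ===== SOURCE A (Python) =====
-- from typing import List
--
-- def get_similar_str(str_list: List[str], target: str) -> int:
--     result = 0
--     table = 'abcdefghijklmnopqrstuvwxyz'
--
--     def get_model(strings):
--         target_model = []
--         mapping = dict.fromkeys(table)
--         for index, number in enumerate(strings):
--             if mapping[number] is None:
--                 mapping[number] = []
--             mapping[number].append(index)
--
--         for string in strings:
--             if len(mapping[string]) != 0:
--                 target_model.append(mapping[string])
--
--         return target_model
--
--     model = get_model(target)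
--     for item in str_list:
--         if model == get_model(item):
--             result += 1
--
--     return result
-- ===== SOURCE B (Python) =====
-- from typing import List
--
-- def get_similar_str(str_list: List[str], target: str) -> int:
--     table = 'abcdefghijklmnopqrstuvwxyz'
--
--     def get_pattern(s):
--         # single pass: first-occurrence canonical encoding (list of ints)
--         mapping = dict.fromkeys(table)
--         pattern = []
--         for i, c in enumerate(s):
--             if mapping[c] is None:
--                 mapping[c] = i
--             pattern.append(mapping[c])
--         return pattern
--
--     target_pattern = get_pattern(target)
--     return sum(1 for s in str_list if get_pattern(s) == target_pattern)
-- ===== Notes on version B (the rewrite author's own statement) =====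
-- stated objective: simpler
-- what changed: get_model's two-pass dict-of-index-lists signature (a list of per-position occurrence lists) is replaced by a single-pass first-occurrence integer encoding; the outer counting loop stays, comparing the int patterns instead.
import Mathlib
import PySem

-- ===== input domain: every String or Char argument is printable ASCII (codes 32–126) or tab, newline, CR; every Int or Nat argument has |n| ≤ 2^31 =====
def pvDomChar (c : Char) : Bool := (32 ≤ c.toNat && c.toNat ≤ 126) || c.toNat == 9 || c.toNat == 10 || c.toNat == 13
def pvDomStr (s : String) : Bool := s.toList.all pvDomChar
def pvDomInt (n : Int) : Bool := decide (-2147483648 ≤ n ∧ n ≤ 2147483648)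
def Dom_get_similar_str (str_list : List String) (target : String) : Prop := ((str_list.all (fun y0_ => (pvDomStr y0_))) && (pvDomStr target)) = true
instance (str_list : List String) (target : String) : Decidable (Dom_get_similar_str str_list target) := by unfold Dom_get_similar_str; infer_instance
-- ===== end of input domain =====

-- B replaces A's two-pass list-of-occurrence-lists model by a one-pass first-occurrence
-- integer encoding (simpler); equivalence is proved on inputs whose characters are all 'a'-'z'
-- (elsewhere both Pythons raise KeyError).

-- ===== PORT A =====
-- table = 'abcdefghijklmnopqrstuvwxyz'
def pvTable : List Char :=
  ['a','b','c','d','e','f','g','h','i','j','k','l','m','n','o','p','q','r','s','t','u','v','w','x','y','z']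

-- mapping = dict.fromkeys(table)  (values start as None)
def pvInitA : PySem.Dict Char (Option (List Int)) :=
  PySem.Dict.ofList (pvTable.map (fun c => (c, none)))

-- first loop of get_model: for index, number in enumerate(strings): …  (none = KeyError)
def pvBuildA : List (Int × Char) → PySem.Dict Char (Option (List Int)) →
    Option (PySem.Dict Char (Option (List Int)))
  | [], m => some m
  | (i, c) :: rest, m =>
    match m.get? c with
    | none => none                                   -- KeyError
    | some v =>
      let l := match v with | none => ([] : List Int) | some l => l   -- if … is None: = []
      pvBuildA rest (m.insert c (some (l ++ [i])))   -- mapping[number].append(index)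

-- second loop of get_model: for string in strings: if len(mapping[string]) != 0: append
def pvCollectA : List Char → PySem.Dict Char (Option (List Int)) → Option (List (List Int))
  | [], _ => some []
  | c :: rest, m =>
    match m.get? c with
    | none => none                                   -- KeyError
    | some none => none                              -- len(None): TypeError (unreachable here)
    | some (some l) =>
      if l.length ≠ 0 then (pvCollectA rest m).map (fun t => l :: t)
      else pvCollectA rest m

def pvModelA (s : List Char) : Option (List (List Int)) :=
  match pvBuildA (PySem.List.enumerate s) pvInitA with
  | none => none
  | some m => pvCollectA s m

-- for item in str_list: if model == get_model(item): result += 1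
def pvLoopA : List String → List (List Int) → Int → Option Int
  | [], _, r => some r
  | item :: rest, model, r =>
    match pvModelA item.toList with
    | none => none
    | some m => pvLoopA rest model (if model = m then r + 1 else r)

def get_similar_str (str_list : List String) (target : String) : Int :=
  (match pvModelA target.toList with
   | none => none
   | some model => pvLoopA str_list model 0).getD 0   -- none = the Python raises (excluded by Pre_)

-- ===== PORT B =====
def pvInitB : PySem.Dict Char (Option Int) :=
  PySem.Dict.ofList (pvTable.map (fun c => (c, none)))

-- for i, c in enumerate(s): if mapping[c] is None: mapping[c] = i; pattern.append(mapping[c])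
def pvPatB : List (Int × Char) → PySem.Dict Char (Option Int) → List Int → Option (List Int)
  | [], _, acc => some acc
  | (i, c) :: rest, m, acc =>
    match m.get? c with
    | none => none                                   -- KeyError
    | some none => pvPatB rest (m.insert c (some i)) (acc ++ [i])
    | some (some j) => pvPatB rest m (acc ++ [j])

def pvPatternB (s : List Char) : Option (List Int) :=
  pvPatB (PySem.List.enumerate s) pvInitB []

def get_similar_str_alt (str_list : List String) (target : String) : Int :=
  (do
    let tp ← pvPatternB target.toList
    str_list.foldlM (fun (r : Int) (s : String) => do
      let p ← pvPatternB s.toList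
      pure (if p = tp then r + 1 else r)) (0 : Int)).getD 0

-- ===== PRECONDITION & SPEC =====
-- Pre_ excludes exactly the inputs with a character outside 'a'-'z', on which both Pythons raise KeyError.
def pvAZ (c : Char) : Bool := decide (c ∈ pvTable)
def Pre_get_similar_str (str_list : List String) (target : String) : Prop :=
  (target.toList.all pvAZ && str_list.all (fun s => s.toList.all pvAZ)) = true
instance (str_list : List String) (target : String) : Decidable (Pre_get_similar_str str_list target) := by
  unfold Pre_get_similar_str; infer_instance

def pvWitness_get_similar_str : List String × String := (["abca", "xyzx", "abcd"], "lmnl")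

def Spec_get_similar_str (str_list : List String) (target : String) (out : Int) : Prop := out = get_similar_str_alt str_list target
instance (str_list : List String) (target : String) (out : Int) : Decidable (Spec_get_similar_str str_list target out) := by unfold Spec_get_similar_str; infer_instance

-- ===== CLAIM (what is proved, stated in full; the proofs are below) =====
def Claim_equal_get_similar_str : Prop := ∀ (str_list : List String) (target : String), Dom_get_similar_str str_list target → Pre_get_similar_str str_list target → Spec_get_similar_str str_list target (get_similar_str str_list target)

-- ===== LEMMAS AND PROOFS =====

-- canonical specifications of the two signatures
def pvOcc (s : List Char) (c : Char) : List Int :=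
  ((PySem.List.enumerate s).filter (fun p => p.2 == c)).map Prod.fst

def pvModelSpec (s : List Char) : List (List Int) := s.map (pvOcc s)

def pvPatSpec (s : List Char) : List Int := s.map (fun c => ((s.idxOf c : Nat) : Int))

-- intended value of A's mapping after the first loop over pairs ps, starting from values f
def pvUpd (f : Char → Option (List Int)) (ps : List (Int × Char)) (c : Char) : Option (List Int) :=
  if (ps.filter (fun p => p.2 == c)).map Prod.fst = [] then f c
  else some ((f c).getD [] ++ (ps.filter (fun p => p.2 == c)).map Prod.fst)

-- intended output of B's loop over pairs ps when the dict holds h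
def pvPatF (h : Char → Option Int) : List (Int × Char) → List Int
  | [] => []
  | (i, c) :: rest => (h c).getD i :: pvPatF (fun x => if x = c then some ((h c).getD i) else h x) rest

lemma pvFind_map_const {ν : Type} (l : List Char) (v0 : ν) (c : Char) :
    (List.find? (fun p => p.1 == c) (l.map (fun k => (k, v0)))) = if c ∈ l then some (c, v0) else none := by
  induction l with
  | nil => simp
  | cons k rest ih =>
    by_cases hk : k = c
    · subst hk; simp
    · simp only [List.map_cons, List.find?_cons, List.mem_cons]
      have : (k == c) = false := by simp [hk]
      simp [this, ih, Ne.symm hk]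

lemma pvInitA_get? (c : Char) : pvInitA.get? c = if c ∈ pvTable then some none else none := by
  have hitems : pvInitA.items = pvTable.map (fun k => (k, (none : Option (List Int)))) := by rfl
  simp only [PySem.Dict.get?, hitems, pvFind_map_const]
  split <;> rfl

lemma pvInitB_get? (c : Char) : pvInitB.get? c = if c ∈ pvTable then some none else none := by
  have hitems : pvInitB.items = pvTable.map (fun k => (k, (none : Option Int))) := by rfl
  simp only [PySem.Dict.get?, hitems, pvFind_map_const]
  split <;> rfl

lemma pvUpd_cons (f : Char → Option (List Int)) (i : Int) (c : Char) (rest : List (Int × Char)) (c' : Char) :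
    pvUpd f ((i, c) :: rest) c' =
      pvUpd (fun x => if x = c then some ((f c).getD [] ++ [i]) else f x) rest c' := by
  by_cases h : c' = c
  · subst h
    simp only [pvUpd, List.filter_cons, beq_self_eq_true, if_true, List.map_cons]
    by_cases hL : (rest.filter (fun p => p.2 == c')).map Prod.fst = []
    · simp [hL]
    · simp only [hL, if_false, List.cons_ne_nil, Option.getD_some]
      rw [List.append_cons]
  · have hb : ((i, c).2 == c') = false := by simp [Ne.symm h]
    simp only [pvUpd, List.filter_cons, hb, if_neg (by exact h)]
    rfl

lemma pvBuildA_spec : ∀ (ps : List (Int × Char)) (m : PySem.Dict Char (Option (List Int)))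
    (f : Char → Option (List Int)),
    (∀ p ∈ ps, p.2 ∈ pvTable) →
    (∀ c, m.get? c = if c ∈ pvTable then some (f c) else none) →
    ∃ m', pvBuildA ps m = some m' ∧
      ∀ c, m'.get? c = if c ∈ pvTable then some (pvUpd f ps c) else none := by
  intro ps
  induction ps with
  | nil =>
    intro m f _ hm
    exact ⟨m, rfl, fun c => by simpa [pvUpd] using hm c⟩
  | cons p rest ih =>
    obtain ⟨i, c⟩ := p
    intro m f hps hm
    have hc : c ∈ pvTable := hps (i, c) (by simp)
    have hmc : m.get? c = some (f c) := by rw [hm c, if_pos hc]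
    have hinv : ∀ x, (m.insert c (some ((f c).getD [] ++ [i]))).get? x =
        if x ∈ pvTable then some ((fun y => if y = c then some ((f c).getD [] ++ [i]) else f y) x) else none := by
      intro x
      rw [PySem.Dict.get?_insert]
      by_cases hx : x = c
      · subst hx; simp [hc]
      · simp only [if_neg hx, hm x]
    obtain ⟨m', h1, h2⟩ := ih (m.insert c (some ((f c).getD [] ++ [i])))
      (fun y => if y = c then some ((f c).getD [] ++ [i]) else f y)
      (fun q hq => hps q (by simp [hq])) hinv
    refine ⟨m', ?_, ?_⟩
    · rw [show pvBuildA ((i, c) :: rest) m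
          = pvBuildA rest (m.insert c (some ((f c).getD [] ++ [i]))) by
        simp only [pvBuildA, hmc]
        cases f c <;> rfl]
      exact h1
    · intro x
      rw [h2 x, pvUpd_cons]

lemma pvOcc_ne_nil {s : List Char} {c : Char} (h : c ∈ s) : pvOcc s c ≠ [] := by
  obtain ⟨k, hk, rfl⟩ := List.mem_iff_getElem.mp h
  have hp : ((0 + (k : Int), s[k]) : Int × Char) ∈ PySem.List.enumerate s 0 := by
    rw [PySem.List.mem_enumerate_iff]
    exact ⟨k, hk, rfl⟩
  have hf : ((0 + (k : Int), s[k]) : Int × Char) ∈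
      (PySem.List.enumerate s).filter (fun p => p.2 == s[k]) := by
    refine List.mem_filter.mpr ⟨hp, by simp⟩
  exact List.ne_nil_of_mem (List.mem_map_of_mem hf)

lemma pvCollectA_eq (s : List Char) (m : PySem.Dict Char (Option (List Int)))
    (hm : ∀ c, m.get? c =
      if c ∈ pvTable then some (pvUpd (fun _ => none) (PySem.List.enumerate s) c) else none) :
    ∀ l : List Char, (∀ c ∈ l, c ∈ s ∧ c ∈ pvTable) → pvCollectA l m = some (l.map (pvOcc s)) := by
  intro l
  induction l with
  | nil => intro _; rfl
  | cons c rest ih =>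
    intro hl
    obtain ⟨hcs, hct⟩ := hl c (by simp)
    have hocc : pvOcc s c ≠ [] := pvOcc_ne_nil hcs
    have hval : m.get? c = some (some (pvOcc s c)) := by
      rw [hm c, if_pos hct]
      simp only [pvUpd]
      rw [if_neg (by simpa [pvOcc] using hocc)]
      simp [pvOcc]
    simp only [pvCollectA, hval]
    rw [if_pos (by simpa using hocc)]
    rw [ih (fun x hx => hl x (by simp [hx]))]
    rfl

lemma pvModelA_eq (s : List Char) (h : ∀ c ∈ s, c ∈ pvTable) :
    pvModelA s = some (pvModelSpec s) := by
  obtain ⟨m', h1, h2⟩ := pvBuildA_spec (PySem.List.enumerate s) pvInitA (fun _ => none)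
    (by
      intro p hp
      rw [PySem.List.mem_enumerate_iff] at hp
      obtain ⟨k, hk, rfl⟩ := hp
      exact h _ (List.getElem_mem hk))
    (fun c => by rw [pvInitA_get? c])
  unfold pvModelA
  rw [h1]
  exact pvCollectA_eq s m' h2 s (fun c hc => ⟨hc, h c hc⟩)

lemma pvPatB_run : ∀ (ps : List (Int × Char)) (m : PySem.Dict Char (Option Int))
    (acc : List Int) (h : Char → Option Int),
    (∀ p ∈ ps, p.2 ∈ pvTable) →
    (∀ c, m.get? c = if c ∈ pvTable then some (h c) else none) →
    pvPatB ps m acc = some (acc ++ pvPatF h ps) := by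
  intro ps
  induction ps with
  | nil => intro m acc h _ _; simp [pvPatB, pvPatF]
  | cons p rest ih =>
    obtain ⟨i, c⟩ := p
    intro m acc h hps hm
    have hc : c ∈ pvTable := hps (i, c) (by simp)
    have hmc : m.get? c = some (h c) := by rw [hm c, if_pos hc]
    have hrest : ∀ p ∈ rest, p.2 ∈ pvTable := fun q hq => hps q (by simp [hq])
    cases hhc : h c with
    | none =>
      have hinv : ∀ x, (m.insert c (some i)).get? x =
          if x ∈ pvTable then some ((fun y => if y = c then some i else h y) x) else none := by
        intro x
        rw [PySem.Dict.get?_insert]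
        by_cases hx : x = c
        · subst hx; simp [hc]
        · simp only [if_neg hx, hm x]
      have := ih (m.insert c (some i)) (acc ++ [i]) (fun y => if y = c then some i else h y) hrest hinv
      simp only [pvPatB, hmc, hhc]
      rw [this]
      simp [pvPatF, hhc]
    | some j =>
      have hfun : (fun x => if x = c then some ((h c).getD i) else h x) = h := by
        funext x
        by_cases hx : x = c
        · subst hx; rw [hhc]; simp
        · simp [hx]
      have := ih m (acc ++ [j]) h hrest hm
      simp only [pvPatB, hmc, hhc]
      rw [this]
      have hfun2 : (fun x => if x = c then some j else h x) = h := by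
        funext x
        by_cases hx : x = c
        · subst hx; simp [hhc]
        · simp [hx]
      simp [pvPatF, hhc, hfun2]

lemma pvPatF_idxOf : ∀ (suf pre : List Char),
    pvPatF (fun c => if c ∈ pre then some ((pre.idxOf c : Nat) : Int) else none)
      (PySem.List.enumerate suf (pre.length : Int))
    = suf.map (fun c => (((pre ++ suf).idxOf c : Nat) : Int)) := by
  intro suf
  induction suf with
  | nil => intro pre; simp [pvPatF]
  | cons c rest ih =>
    intro pre
    rw [PySem.List.enumerate_cons]
    simp only [pvPatF]
    have hval : ((if c ∈ pre then some ((pre.idxOf c : Nat) : Int) else none).getD (pre.length : Int))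
        = (((pre ++ c :: rest).idxOf c : Nat) : Int) := by
      by_cases hcp : c ∈ pre
      · rw [if_pos hcp, Option.getD_some, List.idxOf_append_of_mem hcp]
      · rw [if_neg hcp, Option.getD_none, List.idxOf_append]
        rw [if_neg hcp, List.idxOf_cons_self]
        push_cast; ring
    rw [hval]
    have hidx : ((pre ++ c :: rest).idxOf c) = ((pre ++ [c]).idxOf c) := by
      by_cases hcp : c ∈ pre
      · rw [List.idxOf_append_of_mem hcp, List.idxOf_append_of_mem hcp]
      · rw [List.idxOf_append, if_neg hcp, List.idxOf_append, if_neg hcp]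
        simp
    have hfun : (fun x => if x = c then some (((pre ++ c :: rest).idxOf c : Nat) : Int)
          else if x ∈ pre then some ((pre.idxOf x : Nat) : Int) else none)
        = (fun x => if x ∈ pre ++ [c] then some (((pre ++ [c]).idxOf x : Nat) : Int) else none) := by
      funext x
      by_cases hx : x = c
      · subst hx
        rw [if_pos rfl, if_pos (by simp), hidx]
      · rw [if_neg hx]
        by_cases hxp : x ∈ pre
        · rw [if_pos hxp, if_pos (by simp [hxp]), List.idxOf_append_of_mem hxp]
        · rw [if_neg hxp, if_neg (by simp [hxp, hx])]
    have hlen : (pre.length : Int) + 1 = ((pre ++ [c]).length : Int) := by simp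
    rw [hfun, hlen, ih (pre ++ [c])]
    simp [List.append_assoc]

lemma pvPatternB_eq (s : List Char) (h : ∀ c ∈ s, c ∈ pvTable) :
    pvPatternB s = some (pvPatSpec s) := by
  unfold pvPatternB
  rw [pvPatB_run (PySem.List.enumerate s) pvInitB [] (fun _ => none)
    (by
      intro p hp
      rw [PySem.List.mem_enumerate_iff] at hp
      obtain ⟨k, hk, rfl⟩ := hp
      exact h _ (List.getElem_mem hk))
    (fun c => by rw [pvInitB_get? c])]
  have h0 : (fun (c : Char) => (none : Option Int))
      = (fun c => if c ∈ ([] : List Char) then some ((([] : List Char).idxOf c : Nat) : Int) else none) := by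
    funext c; simp
  have := pvPatF_idxOf s []
  simp only [List.length_nil, Nat.cast_zero, List.nil_append] at this
  rw [h0]
  have he : PySem.List.enumerate s = PySem.List.enumerate s ((0 : Int)) := rfl
  rw [he, this]
  simp [pvPatSpec]

lemma pvFind?_enumerate (s : List Char) (c : Char) : ∀ (k : Int), c ∈ s →
    (PySem.List.enumerate s k).find? (fun p => p.2 == c) = some (k + (s.idxOf c : Nat), c) := by
  induction s with
  | nil => intro k hc; simp at hc
  | cons a rest ih =>
    intro k hc
    rw [PySem.List.enumerate_cons, List.find?_cons]
    by_cases ha : a = c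
    · subst ha
      simp [List.idxOf_cons_self]
    · have hc' : c ∈ rest := by
        rcases List.mem_cons.mp hc with h | h
        · exact absurd h.symm ha
        · exact h
      have hb : ((k, a).2 == c) = false := by simp [ha]
      rw [hb, ih (k + 1) hc', List.idxOf_cons_ne rest ha]
      have harith : (k + 1) + ((rest.idxOf c : Nat) : Int) = k + (((rest.idxOf c).succ : Nat) : Int) := by
        push_cast
        ring
      rw [harith]

lemma pvOcc_head {s : List Char} {c : Char} (h : c ∈ s) :
    (pvOcc s c).head? = some ((s.idxOf c : Nat) : Int) := by
  unfold pvOcc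
  rw [List.head?_map, List.head?_filter, pvFind?_enumerate s c 0 h]
  simp

lemma pvEnumFilterCongr : ∀ (s t : List Char), s.length = t.length →
    ∀ (k0 : Int) (P Q : Char → Bool),
    (∀ j (hj : j < s.length) (hj' : j < t.length), P s[j] = Q t[j]) →
    ((PySem.List.enumerate s k0).filter (fun p => P p.2)).map Prod.fst
      = ((PySem.List.enumerate t k0).filter (fun p => Q p.2)).map Prod.fst := by
  intro s
  induction s with
  | nil =>
    intro t hlen k0 P Q h
    cases t with
    | nil => rfl
    | cons b t' => simp at hlen
  | cons a s' ih =>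
    intro t hlen k0 P Q h
    cases t with
    | nil => simp at hlen
    | cons b t' =>
      have hlen' : s'.length = t'.length := by simpa using hlen
      have h0 : P a = Q b := by
        have := h 0 (by simp) (by simp)
        simpa using this
      have htail := ih t' hlen' (k0 + 1) P Q (fun j hj hj' => by
        have := h (j + 1) (by simpa using Nat.succ_lt_succ hj) (by simpa using Nat.succ_lt_succ hj')
        simpa using this)
      rw [PySem.List.enumerate_cons, PySem.List.enumerate_cons]
      by_cases hpa : P a = true
      · have hqb : Q b = true := by rw [← h0]; exact hpa
        simp only [List.filter_cons, hpa, hqb, if_true, List.map_cons]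
        rw [htail]
      · have hqb : Q b = false := by rw [← h0]; simpa using hpa
        simp only [List.filter_cons, hpa, hqb, Bool.false_eq_true, if_false]
        exact htail

lemma pvModel_iff_pat (s t : List Char) :
    pvModelSpec s = pvModelSpec t ↔ pvPatSpec s = pvPatSpec t := by
  constructor
  · intro hm
    have hl : s.length = t.length := by
      have := congrArg List.length hm
      simpa [pvModelSpec] using this
    have key : ∀ k (hk : k < s.length) (hk' : k < t.length), pvOcc s s[k] = pvOcc t t[k] := by
      intro k hk hk'
      have h1 : (pvModelSpec s)[k]'(by simpa [pvModelSpec] using hk)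
          = (pvModelSpec t)[k]'(by simpa [pvModelSpec] using hk') := List.getElem_of_eq hm _
      simpa [pvModelSpec, List.getElem_map] using h1
    apply List.ext_getElem (by simpa [pvPatSpec] using hl)
    intro k hk1 hk2
    have hk : k < s.length := by simpa [pvPatSpec] using hk1
    have hk' : k < t.length := by simpa [pvPatSpec] using hk2
    simp only [pvPatSpec, List.getElem_map]
    have h2 : (pvOcc s s[k]).head? = (pvOcc t t[k]).head? := by rw [key k hk hk']
    rw [pvOcc_head (List.getElem_mem hk), pvOcc_head (List.getElem_mem hk')] at h2
    simpa using h2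
  · intro hp
    have hl : s.length = t.length := by
      have := congrArg List.length hp
      simpa [pvPatSpec] using this
    have hidx : ∀ j (hj : j < s.length) (hj' : j < t.length), s.idxOf s[j] = t.idxOf t[j] := by
      intro j hj hj'
      have h1 : (pvPatSpec s)[j]'(by simpa [pvPatSpec] using hj)
          = (pvPatSpec t)[j]'(by simpa [pvPatSpec] using hj') := List.getElem_of_eq hp _
      simp only [pvPatSpec, List.getElem_map] at h1
      exact_mod_cast h1
    have hiff : ∀ j k (hj : j < s.length) (hk : k < s.length) (hj' : j < t.length)
        (hk' : k < t.length), (s[j] = s[k]) ↔ (t[j] = t[k]) := by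
      intro j k hj hk hj' hk'
      constructor
      · intro e
        have e1 : t.idxOf t[j] = t.idxOf t[k] := by
          rw [← hidx j hj hj', ← hidx k hk hk', e]
        have m1 : t.idxOf t[j] < t.length := List.idxOf_lt_length_of_mem (List.getElem_mem hj')
        have m2 : t.idxOf t[k] < t.length := List.idxOf_lt_length_of_mem (List.getElem_mem hk')
        calc t[j] = t[t.idxOf t[j]]'m1 := (List.getElem_idxOf m1).symm
          _ = t[t.idxOf t[k]]'m2 := by simp only [e1]
          _ = t[k] := List.getElem_idxOf m2
      · intro e
        have e1 : s.idxOf s[j] = s.idxOf s[k] := by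
          rw [hidx j hj hj', hidx k hk hk', e]
        have m1 : s.idxOf s[j] < s.length := List.idxOf_lt_length_of_mem (List.getElem_mem hj)
        have m2 : s.idxOf s[k] < s.length := List.idxOf_lt_length_of_mem (List.getElem_mem hk)
        calc s[j] = s[s.idxOf s[j]]'m1 := (List.getElem_idxOf m1).symm
          _ = s[s.idxOf s[k]]'m2 := by simp only [e1]
          _ = s[k] := List.getElem_idxOf m2
    apply List.ext_getElem (by simpa [pvModelSpec] using hl)
    intro k hk1 hk2
    have hk : k < s.length := by simpa [pvModelSpec] using hk1
    have hk' : k < t.length := by simpa [pvModelSpec] using hk2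
    simp only [pvModelSpec, List.getElem_map]
    unfold pvOcc
    apply pvEnumFilterCongr s t hl 0 (fun x => x == s[k]) (fun x => x == t[k])
    intro j hj hj'
    by_cases hb : s[j] = s[k]
    · simp [hb, (hiff j k hj hk hj' hk').mp hb]
    · have hb' : ¬ t[j] = t[k] := fun hh => hb ((hiff j k hj hk hj' hk').mpr hh)
      simp [hb, hb']

lemma pvLoopA_eq (M : List (List Int)) : ∀ (l : List String) (r : Int),
    (∀ s ∈ l, ∀ c ∈ s.toList, c ∈ pvTable) →
    pvLoopA l M r = some (l.foldl (fun r s => if M = pvModelSpec s.toList then r + 1 else r) r) := by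
  intro l
  induction l with
  | nil => intro r _; rfl
  | cons a rest ih =>
    intro r hl
    have hm := pvModelA_eq a.toList (hl a (by simp))
    simp only [pvLoopA, hm, List.foldl_cons]
    exact ih _ (fun x hx => hl x (by simp [hx]))

lemma pvLoopB_eq (TP : List Int) : ∀ (l : List String) (r : Int),
    (∀ s ∈ l, ∀ c ∈ s.toList, c ∈ pvTable) →
    (List.foldlM (fun (r : Int) (s : String) => do
        let p ← pvPatternB s.toList
        pure (if p = TP then r + 1 else r)) r l : Option Int)
      = some (l.foldl (fun r s => if pvPatSpec s.toList = TP then r + 1 else r) r) := by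
  intro l
  induction l with
  | nil => intro r _; rfl
  | cons a rest ih =>
    intro r hl
    have hp := pvPatternB_eq a.toList (hl a (by simp))
    simp only [List.foldlM_cons, hp, Option.bind_eq_bind, Option.bind_some, List.foldl_cons]
    exact ih _ (fun x hx => hl x (by simp [hx]))

lemma pvFoldCong (M : List (List Int)) (TP : List Int)
    (hM : ∀ u : List Char, (M = pvModelSpec u) ↔ (pvPatSpec u = TP)) :
    ∀ (l : List String) (r : Int),
    l.foldl (fun r s => if M = pvModelSpec s.toList then r + 1 else r) r
      = l.foldl (fun r s => if pvPatSpec s.toList = TP then r + 1 else r) r := by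
  intro l
  induction l with
  | nil => intro r; rfl
  | cons a rest ih =>
    intro r
    simp only [List.foldl_cons]
    rw [show (if M = pvModelSpec a.toList then r + 1 else r)
        = (if pvPatSpec a.toList = TP then r + 1 else r) from by
      by_cases hh : M = pvModelSpec a.toList
      · rw [if_pos hh, if_pos ((hM a.toList).mp hh)]
      · rw [if_neg hh, if_neg (fun hx => hh ((hM a.toList).mpr hx))]]
    exact ih _

-- ===== VERDICT (by name: the statement is the Claim_ definition above) =====
theorem get_similar_str_spec : Claim_equal_get_similar_str := by
  intro sl t _ hpre
  unfold Spec_get_similar_str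
  unfold Pre_get_similar_str at hpre
  simp only [Bool.and_eq_true, List.all_eq_true, decide_eq_true_eq, pvAZ] at hpre
  obtain ⟨hT, hL⟩ := hpre
  unfold get_similar_str get_similar_str_alt
  rw [pvModelA_eq t.toList hT, pvPatternB_eq t.toList hT]
  have hLl : ∀ s ∈ sl, ∀ c ∈ s.toList, c ∈ pvTable := hL
  rw [show (match some (pvModelSpec t.toList) with
      | none => none
      | some model => pvLoopA sl model 0) = pvLoopA sl (pvModelSpec t.toList) 0 from rfl]
  rw [pvLoopA_eq (pvModelSpec t.toList) sl 0 hLl]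
  change (some (sl.foldl (fun r s => if pvModelSpec t.toList = pvModelSpec s.toList then r + 1 else r) 0)).getD 0
    = ((List.foldlM (fun (r : Int) (s : String) => do
          let p ← pvPatternB s.toList
          pure (if p = pvPatSpec t.toList then r + 1 else r)) 0 sl : Option Int)).getD 0
  rw [pvLoopB_eq (pvPatSpec t.toList) sl 0 hLl]
  simp only [Option.getD_some]
  exact pvFoldCong (pvModelSpec t.toList) (pvPatSpec t.toList)
    (fun u => ⟨fun h => ((pvModel_iff_pat t.toList u).mp h).symm,
               fun h => (pvModel_iff_pat t.toList u).mpr h.symm⟩) sl 0
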